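-- pv_equiv track=rewrite | github.com/thomas-hoger/5G-Anomaly-Detection | src/networkanomalydetection/core/vectorization/hierarchical_handler.py | _construct_parent_path
-- ===== SOURCE A (Python) =====
-- from typing import Dict, List, Any, Optional
--
-- def _construct_parent_path(levels: List[str], indices: List[int]) -> str:
--     """Construit le chemin parent"""
--     if not levels:
--         return ""
--
--     parts = []
--     index_pos = 0
--
--     for level in levels:
--         if index_pos < len(indices):
--             parts.append(f"{level}[{indices[index_pos]}]")
--             index_pos += 1
--         else:
--             parts.append(level)
--
--     return ".".join(parts)
-- ===== SOURCE B (Python) =====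
-- from typing import List
--
-- def _construct_parent_path(levels: List[str], indices: List[int]) -> str:
--     n = len(levels)
--     n_idx = len(indices)
--
--     def seg(lo: int, hi: int) -> str:
--         # dotted path of positions [lo, hi), hi > lo
--         if hi - lo == 1:
--             return f"{levels[lo]}[{indices[lo]}]" if lo < n_idx else levels[lo]
--         mid = (lo + hi) // 2
--         return seg(lo, mid) + "." + seg(mid, hi)
--
--     return seg(0, n) if n else ""
-- ===== Notes on version B (the rewrite author's own statement) =====
-- stated objective: alternative
-- what changed: Replaces A's single forward scan (running index_pos counter, parts list, final join) by a divide-and-conquer recursion that formats each position once at the leaves and concatenates the two halves' dotted paths around a '.', with no parts list, no counter and no join.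
import Mathlib
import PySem

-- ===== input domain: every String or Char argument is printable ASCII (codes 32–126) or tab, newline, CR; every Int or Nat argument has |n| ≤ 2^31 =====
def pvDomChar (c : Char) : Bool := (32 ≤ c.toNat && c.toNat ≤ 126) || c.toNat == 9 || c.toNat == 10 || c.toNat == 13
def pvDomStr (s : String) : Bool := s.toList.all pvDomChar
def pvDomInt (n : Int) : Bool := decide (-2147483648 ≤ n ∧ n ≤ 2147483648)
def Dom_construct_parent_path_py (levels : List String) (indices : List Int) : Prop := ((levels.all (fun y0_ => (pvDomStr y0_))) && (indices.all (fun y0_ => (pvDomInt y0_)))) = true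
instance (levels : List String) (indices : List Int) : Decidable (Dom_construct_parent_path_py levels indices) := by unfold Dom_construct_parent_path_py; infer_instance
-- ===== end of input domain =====

-- B builds the path by divide and conquer: each position is formatted once at a leaf and the two halves'
-- dotted paths are concatenated around "." — no parts list, no running counter, no join (alternative algorithm).

-- ===== PORT A =====
-- the loop body, carrying the accumulated `parts` and the running counter `index_pos`;
-- `indices[index_pos]` is read via pyGet? (always in range when the branch is taken, so getD 0 is never the default)
def pvALoop (lvls : List String) (indices : List Int) (parts : List String) (index_pos : Nat) : List String :=
  match lvls with
  | [] => parts
  | level :: rest =>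
    if index_pos < indices.length then
      pvALoop rest indices (parts ++ [level ++ "[" ++ PySem.Int.toStr ((PySem.List.pyGet? indices (index_pos : Int)).getD 0) ++ "]"]) (index_pos + 1)
    else
      pvALoop rest indices (parts ++ [level]) index_pos

def construct_parent_path_py (levels : List String) (indices : List Int) : String :=
  if levels = [] then ""
  else PySem.Str.join "." (pvALoop levels indices [] 0)

-- ===== PORT B =====
-- `seg(lo, hi)`: the dotted path of positions [lo, hi); Python only ever calls it with lo < hi, so the
-- `hi ≤ lo` guard is unreachable — it only makes the recursion total. levels[lo] / indices[lo] are read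
-- via pyGetD (lo is always in range on the calls made, so the defaults "" / 0 are never used);
-- `(lo + hi) // 2` is PySem.Int.floordiv.
def pvSeg (levels : List String) (indices : List Int) (lo hi : Int) : String :=
  if hi ≤ lo then ""
  else if hi - lo = 1 then
    if lo < (indices.length : Int)
      then PySem.List.pyGetD levels lo "" ++ "[" ++ PySem.Int.toStr (PySem.List.pyGetD indices lo 0) ++ "]"
      else PySem.List.pyGetD levels lo ""
  else
    pvSeg levels indices lo (PySem.Int.floordiv (lo + hi) 2) ++ "." ++
      pvSeg levels indices (PySem.Int.floordiv (lo + hi) 2) hi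
termination_by (hi - lo).toNat
decreasing_by
  all_goals
    rw [PySem.Int.floordiv_eq_ediv_of_pos (by norm_num)]
    omega

def construct_parent_path_py_alt (levels : List String) (indices : List Int) : String :=
  if (levels.length : Int) = 0 then "" else pvSeg levels indices 0 (levels.length : Int)

-- ===== PRECONDITION & SPEC =====
def Spec_construct_parent_path_py (levels : List String) (indices : List Int) (out : String) : Prop := out = construct_parent_path_py_alt levels indices
instance (levels : List String) (indices : List Int) (out : String) : Decidable (Spec_construct_parent_path_py levels indices out) := by unfold Spec_construct_parent_path_py; infer_instance

-- ===== CLAIM (what is proved, stated in full; the proofs are below) =====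
def Claim_equal_construct_parent_path_py : Prop := ∀ (levels : List String) (indices : List Int), Dom_construct_parent_path_py levels indices → Spec_construct_parent_path_py levels indices (construct_parent_path_py levels indices)

-- ===== LEMMAS AND PROOFS =====

-- the parts list A's loop builds: indexed zip prefix, then the bare tail
def pvParts (levels : List String) (indices : List Int) : List String :=
  ((levels.zip indices).map (fun p => p.1 ++ "[" ++ PySem.Int.toStr p.2 ++ "]")) ++ levels.drop indices.length

theorem pvParts_length (levels : List String) (indices : List Int) :
    (pvParts levels indices).length = levels.length := by
  simp [pvParts, List.length_zip]; omega

-- A's loop invariant: having consumed `done` indices, it appends the zip prefix over the rest and the bare tail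
theorem pvALoop_invariant (lvls : List String) (doneI restI : List Int) (parts : List String) :
    pvALoop lvls (doneI ++ restI) parts doneI.length
      = parts ++ ((lvls.zip restI).map (fun p => p.1 ++ "[" ++ PySem.Int.toStr p.2 ++ "]"))
          ++ lvls.drop restI.length := by
  induction lvls generalizing doneI restI parts with
  | nil => simp [pvALoop]
  | cons level rest ih =>
    cases restI with
    | nil =>
      have := ih doneI [] (parts ++ [level])
      simp [pvALoop] at this ⊢
      simpa using this
    | cons i restI' =>
      have := ih (doneI ++ [i]) restI' (parts ++ [level ++ "[" ++ PySem.Int.toStr i ++ "]"])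
      simp [pvALoop, PySem.List.pyGet?, PySem.List.pyIdx?]
      simpa using this

theorem pv_join_singleton (a : String) : PySem.Str.join "." [a] = a := by
  simp [PySem.Str.join, PySem.Chars.join, List.intercalate]

theorem pv_join_cons_cons (a b : String) (rest : List String) :
    PySem.Str.join "." (a :: b :: rest) = a ++ "." ++ PySem.Str.join "." (b :: rest) := by
  simp [PySem.Str.join, PySem.Chars.join, List.intercalate, String.ofList_append]
  rw [show ('.' :: (List.intersperse ['.'] (b.toList :: List.map String.toList rest)).flatten)
        = ['.'] ++ (List.intersperse ['.'] (b.toList :: List.map String.toList rest)).flatten from rfl,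
      String.ofList_append, String.append_assoc]

theorem pv_join_cons (a : String) (l : List String) (h : l ≠ []) :
    PySem.Str.join "." (a :: l) = a ++ "." ++ PySem.Str.join "." l := by
  cases l with
  | nil => exact absurd rfl h
  | cons b rest => exact pv_join_cons_cons a b rest

theorem pv_join_append (X Y : List String) (hX : X ≠ []) (hY : Y ≠ []) :
    PySem.Str.join "." (X ++ Y) = PySem.Str.join "." X ++ "." ++ PySem.Str.join "." Y := by
  induction X with
  | nil => exact absurd rfl hX
  | cons x X' ih =>
    cases X' with
    | nil => simp [pv_join_singleton, pv_join_cons x Y hY]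
    | cons x' X'' =>
      rw [List.cons_append, pv_join_cons x ((x' :: X'') ++ Y) (by simp),
          ih (by simp), pv_join_cons_cons]
      simp [String.append_assoc]

-- the piece B formats at position m is exactly entry m of the parts list
theorem pvPiece_eq (levels : List String) (indices : List Int) (m : Nat) (h : m < levels.length) :
    (if (m : Int) < (indices.length : Int)
      then PySem.List.pyGetD levels (m : Int) "" ++ "[" ++ PySem.Int.toStr (PySem.List.pyGetD indices (m : Int) 0) ++ "]"
      else PySem.List.pyGetD levels (m : Int) "")
    = (pvParts levels indices)[m]'(by rw [pvParts_length]; exact h) := by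
  by_cases hm : m < indices.length
  · rw [if_pos (by exact_mod_cast hm)]
    rw [PySem.List.pyGetD_eq_getElem levels "" (by positivity) (by exact_mod_cast h),
        PySem.List.pyGetD_eq_getElem indices 0 (by positivity) (by exact_mod_cast hm)]
    simp [pvParts]
    rw [List.getElem_append_left (by simp [List.length_zip]; omega)]
    simp [List.getElem_zip]
  · rw [if_neg (by exact_mod_cast hm)]
    rw [PySem.List.pyGetD_eq_getElem levels "" (by positivity) (by exact_mod_cast h)]
    simp [pvParts]
    rw [List.getElem_append_right (by simp [List.length_zip]; omega)]
    rw [List.getElem_drop]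
    congr 1
    simp [List.length_zip]
    omega

-- seg(lo, hi) is the dotted join of the slice [lo, hi) of the parts list
theorem pvSeg_eq (levels : List String) (indices : List Int) :
    ∀ (n : Nat) (lo hi : Int), (hi - lo).toNat ≤ n → 0 ≤ lo → lo < hi → hi ≤ (levels.length : Int) →
      pvSeg levels indices lo hi
        = PySem.Str.join "." (((pvParts levels indices).drop lo.toNat).take (hi - lo).toNat) := by
  intro n
  induction n with
  | zero => intro lo hi hn h0 hlt _; exfalso; omega
  | succ n ih =>
    intro lo hi hn h0 hlt hle
    rw [pvSeg]
    rw [if_neg (by omega)]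
    by_cases hone : hi - lo = 1
    · rw [if_pos hone, hone]
      have hlo : lo.toNat < levels.length := by omega
      have hslice : ((pvParts levels indices).drop lo.toNat).take (1 : Int).toNat
          = [(pvParts levels indices)[lo.toNat]'(by rw [pvParts_length]; exact hlo)] := by
        rw [show ((1 : Int)).toNat = 1 from rfl, List.take_one, List.head?_drop,
            List.getElem?_eq_getElem (by rw [pvParts_length]; exact hlo)]
        rfl
      rw [hslice, pv_join_singleton]
      have := pvPiece_eq levels indices lo.toNat hlo
      rw [show ((lo.toNat : Nat) : Int) = lo by omega] at this
      exact this
    · rw [if_neg hone]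
      have hmid : PySem.Int.floordiv (lo + hi) 2 = (lo + hi) / 2 :=
        PySem.Int.floordiv_eq_ediv_of_pos (by norm_num)
      rw [hmid]
      have hlm : lo < (lo + hi) / 2 := by omega
      have hmh : (lo + hi) / 2 < hi := by omega
      rw [ih lo ((lo + hi) / 2) (by omega) h0 hlm (by omega),
          ih ((lo + hi) / 2) hi (by omega) (by omega) hmh hle]
      have hsplit : ((pvParts levels indices).drop lo.toNat).take (hi - lo).toNat
          = ((pvParts levels indices).drop lo.toNat).take ((lo + hi) / 2 - lo).toNat
            ++ ((pvParts levels indices).drop ((lo + hi) / 2).toNat).take (hi - (lo + hi) / 2).toNat := by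
        rw [show (hi - lo).toNat = ((lo + hi) / 2 - lo).toNat + (hi - (lo + hi) / 2).toNat by omega,
            List.take_add, List.drop_drop,
            show lo.toNat + ((lo + hi) / 2 - lo).toNat = ((lo + hi) / 2).toNat by omega]
      rw [hsplit, pv_join_append]
      · intro hcon
        have := congrArg List.length hcon
        simp [pvParts_length] at this
        omega
      · intro hcon
        have := congrArg List.length hcon
        simp [pvParts_length] at this
        omega

-- ===== VERDICT (by name: the statement is the Claim_ definition above) =====
theorem construct_parent_path_py_spec : Claim_equal_construct_parent_path_py := by
  intro levels indices _
  unfold Spec_construct_parent_path_py construct_parent_path_py construct_parent_path_py_alt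
  by_cases h : levels = []
  · subst h; simp
  · have hn : levels.length ≠ 0 := by simpa using h
    rw [if_neg h, if_neg (by exact_mod_cast hn)]
    have hseg := pvSeg_eq levels indices levels.length 0 (levels.length : Int)
      (by omega) (by omega) (by exact_mod_cast Nat.pos_of_ne_zero hn) (by omega)
    have hA := pvALoop_invariant levels [] indices []
    simp at hA
    rw [hseg, hA, show (((levels.length : Int)) - 0).toNat = levels.length by omega,
        show ((0 : Int)).toNat = 0 from rfl, List.drop_zero,
        List.take_of_length_le (le_of_eq (pvParts_length levels indices))]
    simp [pvParts]
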